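-- pv_equiv track=rewrite | github.com/WallE-Chang/cs336-assignment1-basics | src/bpe.py | find_max_frequent_pair
-- ===== SOURCE A (Python) =====
-- from typing import BinaryIO, Dict, List, NamedTuple, Set, Tuple
--
-- def find_max_frequent_pair(pair_2_counts: Dict[Tuple[Tuple[int, ...],
--                                                      Tuple[int, ...]],
--                                                int]) -> Tuple[Tuple[Tuple[int, ...],
--                                                                     Tuple[int, ...]],
--                                                               int]:
--     max_frequent_pair_count = max(pair_2_counts.values())
--     max_frequent_pair_candidates = [
--         pair for pair, count in pair_2_counts.items() if count == max_frequent_pair_count]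
--     # max_frequent_pair_candidates = list(map(lambda x: bytes(((*x[0], *x[1]))), max_frequent_pair_candidates))  # Convert to bytes
--     max_frequent_pair = max(max_frequent_pair_candidates)
--     return max_frequent_pair, max_frequent_pair_count
-- ===== SOURCE B (Python) =====
-- def find_max_frequent_pair(pair_2_counts):
--     best_pair, best_count = max(pair_2_counts.items(), key=lambda kv: (kv[1], kv[0]))
--     return best_pair, best_count
-- ===== Notes on version B (the rewrite author's own statement) =====
-- stated objective: simpler
-- what changed: A's three phases (max over values, comprehension collecting tied pairs, max over the candidates) are collapsed into one argmax pass over the items with the composite key (count, pair).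
import Mathlib
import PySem

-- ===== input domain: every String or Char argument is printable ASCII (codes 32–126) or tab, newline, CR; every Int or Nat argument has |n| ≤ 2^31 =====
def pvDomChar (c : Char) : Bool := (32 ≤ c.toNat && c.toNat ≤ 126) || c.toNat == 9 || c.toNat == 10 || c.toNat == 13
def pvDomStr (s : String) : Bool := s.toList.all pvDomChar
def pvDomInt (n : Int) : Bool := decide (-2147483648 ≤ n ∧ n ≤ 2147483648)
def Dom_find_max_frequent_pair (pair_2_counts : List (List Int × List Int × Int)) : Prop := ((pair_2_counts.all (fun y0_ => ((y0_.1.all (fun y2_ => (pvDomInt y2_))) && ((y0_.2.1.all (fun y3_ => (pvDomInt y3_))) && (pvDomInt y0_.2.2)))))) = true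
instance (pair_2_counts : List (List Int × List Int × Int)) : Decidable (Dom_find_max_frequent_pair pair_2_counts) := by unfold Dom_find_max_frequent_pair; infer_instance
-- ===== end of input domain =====

-- B replaces A's three phases (max count, collect tied pairs, max pair) by a single
-- argmax over the items with the composite key (count, pair); objective: simpler.

-- ===== PORT A =====
-- Python tuple '<' on int tuples = lexicographic List Int '<' (Mathlib's lex order);
-- pairLt is '<' on a pair of int tuples, lexicographically.
def intLt (a b : Int) : Bool := decide (a < b)

def pairLt (p q : List Int × List Int) : Bool :=
  decide (p.1 < q.1) || (decide (p.1 = q.1) && decide (p.2 < q.2))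

def find_max_frequent_pair (pair_2_counts : List (List Int × List Int × Int)) : (List Int × List Int) × Int :=
  match pair_2_counts.map (fun kv => kv.2.2) with
  | [] => (([], []), 0)          -- Python: max() raises ValueError; excluded by Pre_
  | v :: vs =>
    -- max_frequent_pair_count = max(pair_2_counts.values())
    let maxCount := vs.foldl (fun acc x => if intLt acc x then x else acc) v
    -- candidates = [pair for pair, count in items if count == max_count]
    let candidates := (pair_2_counts.filter (fun kv => decide (kv.2.2 = maxCount))).map
        (fun kv => (kv.1, kv.2.1))
    match candidates with
    | [] => (([], []), 0)        -- unreachable: maxCount is attained by some item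
    | c :: cs =>
      -- max_frequent_pair = max(candidates)
      (cs.foldl (fun acc x => if pairLt acc x then x else acc) c, maxCount)

-- ===== PORT B =====
-- keyLt a b ↔ Python '(a_count, a_pair) < (b_count, b_pair)', the composite sort key of Source B
def keyLt (a b : (List Int × List Int) × Int) : Bool :=
  decide (a.2 < b.2) || (decide (a.2 = b.2) && pairLt a.1 b.1)

def find_max_frequent_pair_alt (pair_2_counts : List (List Int × List Int × Int)) : (List Int × List Int) × Int :=
  match pair_2_counts.map (fun kv => ((kv.1, kv.2.1), kv.2.2)) with
  | [] => (([], []), 0)          -- Python: max() raises ValueError; excluded by Pre_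
  | b :: rest =>
    -- max(items, key=lambda kv: (kv[1], kv[0])): keep first, replace on strictly greater key
    rest.foldl (fun best x => if keyLt best x then x else best) b

-- ===== PRECONDITION & SPEC =====
-- Pre_ excludes only the empty dict, on which Python's max() raises ValueError in both A and B.
def Pre_find_max_frequent_pair (pair_2_counts : List (List Int × List Int × Int)) : Prop :=
  pair_2_counts ≠ []
instance (pair_2_counts : List (List Int × List Int × Int)) : Decidable (Pre_find_max_frequent_pair pair_2_counts) := by unfold Pre_find_max_frequent_pair; infer_instance

def pvWitness_find_max_frequent_pair : (List (List Int × List Int × Int)) := [([1], [2], 3)]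

def Spec_find_max_frequent_pair (pair_2_counts : List (List Int × List Int × Int)) (out : (List Int × List Int) × Int) : Prop := out = find_max_frequent_pair_alt pair_2_counts
instance (pair_2_counts : List (List Int × List Int × Int)) (out : (List Int × List Int) × Int) : Decidable (Spec_find_max_frequent_pair pair_2_counts out) := by unfold Spec_find_max_frequent_pair; infer_instance

-- ===== CLAIM (what is proved, stated in full; the proofs are below) =====
def Claim_equal_find_max_frequent_pair : Prop := ∀ (pair_2_counts : List (List Int × List Int × Int)), Dom_find_max_frequent_pair pair_2_counts → Pre_find_max_frequent_pair pair_2_counts → Spec_find_max_frequent_pair pair_2_counts (find_max_frequent_pair pair_2_counts)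

-- ===== LEMMAS AND PROOFS =====

-- Generic "Python max" fold: the result is an element (or the seed), and nothing seen beats it.
theorem pyfoldmax_spec {α : Type} (lt : α → α → Bool)
    (irr : ∀ a, lt a a = false)
    (tr : ∀ a b c, lt a b = true → lt b c = true → lt a c = true)
    (tot : ∀ a b, lt a b = true ∨ a = b ∨ lt b a = true) :
    ∀ (l : List α) (a : α),
      (l.foldl (fun acc x => if lt acc x then x else acc) a = a ∨
       l.foldl (fun acc x => if lt acc x then x else acc) a ∈ l) ∧
      lt (l.foldl (fun acc x => if lt acc x then x else acc) a) a = false ∧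
      ∀ x ∈ l, lt (l.foldl (fun acc x => if lt acc x then x else acc) a) x = false := by
  intro l
  induction l with
  | nil => intro a; exact ⟨Or.inl rfl, irr a, by simp⟩
  | cons x t ih =>
    intro a
    simp only [List.foldl_cons]
    obtain ⟨hmem, hna, hall⟩ := ih (if lt a x then x else a)
    have hnx : lt (t.foldl (fun acc x => if lt acc x then x else acc) (if lt a x then x else a)) x = false := by
      by_cases h : lt a x = true
      · rw [if_pos h] at hna ⊢; exact hna
      · rw [if_neg h] at hna ⊢
        rcases tot a x with h' | h' | h'
        · exact absurd h' h
        · rw [← h']; exact hna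
        · refine Bool.eq_false_iff.mpr (fun hc => ?_)
          have := tr _ _ _ hc h'
          simp [hna] at this
    have hra : lt (t.foldl (fun acc x => if lt acc x then x else acc) (if lt a x then x else a)) a = false := by
      by_cases h : lt a x = true
      · rw [if_pos h] at hna ⊢
        refine Bool.eq_false_iff.mpr (fun hc => ?_)
        have := tr _ _ _ hc h
        simp [hna] at this
      · rw [if_neg h] at hna ⊢; exact hna
    have ha' : (if lt a x then x else a) = x ∨ (if lt a x then x else a) = a := by
      by_cases h : lt a x = true
      · exact Or.inl (if_pos h)
      · exact Or.inr (if_neg h)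
    refine ⟨?_, hra, ?_⟩
    · rcases hmem with h' | h'
      · rcases ha' with e | e
        · exact Or.inr (by rw [h', e]; exact List.mem_cons_self)
        · exact Or.inl (h'.trans e)
      · exact Or.inr (List.mem_cons_of_mem _ h')
    · intro y hy
      rcases List.mem_cons.mp hy with rfl | hy'
      · exact hnx
      · exact hall y hy'

theorem pairLt_irr : ∀ a, pairLt a a = false := by
  intro a; simp [pairLt]

theorem keyLt_irr : ∀ a, keyLt a a = false := by
  intro a; simp [keyLt, pairLt_irr]

theorem intLt_irr : ∀ a : Int, intLt a a = false := by
  intro a; simp [intLt]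

theorem pairLt_trans : ∀ a b c, pairLt a b = true → pairLt b c = true → pairLt a c = true := by
  intro a b c hab hbc
  simp only [pairLt, Bool.or_eq_true, Bool.and_eq_true, decide_eq_true_eq] at *
  rcases hab with h1 | ⟨e1, h1⟩ <;> rcases hbc with h2 | ⟨e2, h2⟩
  · exact Or.inl (lt_trans h1 h2)
  · exact Or.inl (e2 ▸ h1)
  · exact Or.inl (e1 ▸ h2)
  · exact Or.inr ⟨e1.trans e2, lt_trans h1 h2⟩

theorem pairLt_total : ∀ a b, pairLt a b = true ∨ a = b ∨ pairLt b a = true := by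
  intro a b
  simp only [pairLt, Bool.or_eq_true, Bool.and_eq_true, decide_eq_true_eq]
  rcases lt_trichotomy a.1 b.1 with h | h | h
  · exact Or.inl (Or.inl h)
  · rcases lt_trichotomy a.2 b.2 with h2 | h2 | h2
    · exact Or.inl (Or.inr ⟨h, h2⟩)
    · exact Or.inr (Or.inl (Prod.ext h h2))
    · exact Or.inr (Or.inr (Or.inr ⟨h.symm, h2⟩))
  · exact Or.inr (Or.inr (Or.inl h))

theorem keyLt_trans : ∀ a b c, keyLt a b = true → keyLt b c = true → keyLt a c = true := by
  intro a b c hab hbc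
  simp only [keyLt, Bool.or_eq_true, Bool.and_eq_true, decide_eq_true_eq] at *
  rcases hab with h1 | ⟨e1, h1⟩ <;> rcases hbc with h2 | ⟨e2, h2⟩
  · exact Or.inl (lt_trans h1 h2)
  · exact Or.inl (e2 ▸ h1)
  · exact Or.inl (e1 ▸ h2)
  · exact Or.inr ⟨e1.trans e2, pairLt_trans _ _ _ h1 h2⟩

theorem keyLt_total : ∀ a b, keyLt a b = true ∨ a = b ∨ keyLt b a = true := by
  intro a b
  simp only [keyLt, Bool.or_eq_true, Bool.and_eq_true, decide_eq_true_eq]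
  rcases lt_trichotomy a.2 b.2 with h | h | h
  · exact Or.inl (Or.inl h)
  · rcases pairLt_total a.1 b.1 with h2 | h2 | h2
    · exact Or.inl (Or.inr ⟨h, h2⟩)
    · exact Or.inr (Or.inl (Prod.ext h2 h))
    · exact Or.inr (Or.inr (Or.inr ⟨h.symm, h2⟩))
  · exact Or.inr (Or.inr (Or.inl h))

theorem intLt_trans : ∀ a b c : Int, intLt a b = true → intLt b c = true → intLt a c = true := by
  intro a b c
  simp only [intLt, decide_eq_true_eq]
  omega

theorem intLt_total : ∀ a b : Int, intLt a b = true ∨ a = b ∨ intLt b a = true := by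
  intro a b
  simp only [intLt, decide_eq_true_eq]
  omega

-- Two elements of l that nothing in l beats are equal (for a total relation).
theorem max_unique {α : Type} (lt : α → α → Bool)
    (tot : ∀ a b, lt a b = true ∨ a = b ∨ lt b a = true)
    (l : List α) (r₁ r₂ : α) (h₁ : r₁ ∈ l) (h₂ : r₂ ∈ l)
    (m₁ : ∀ x ∈ l, lt r₁ x = false) (m₂ : ∀ x ∈ l, lt r₂ x = false) : r₁ = r₂ := by
  rcases tot r₁ r₂ with h | h | h
  · exact absurd h (by simp [m₁ r₂ h₂])
  · exact h
  · exact absurd h (by simp [m₂ r₁ h₁])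

-- Proof-only abbreviations (definitionally equal to subterms of the ports)
def pvMk (w : List Int × List Int × Int) : (List Int × List Int) × Int := ((w.1, w.2.1), w.2.2)

def pvMc (kv : List Int × List Int × Int) (rest : List (List Int × List Int × Int)) : Int :=
  (rest.map (fun kv => kv.2.2)).foldl (fun acc x => if intLt acc x then x else acc) kv.2.2

def pvCands (kv : List Int × List Int × Int) (rest : List (List Int × List Int × Int)) :
    List (List Int × List Int) :=
  ((kv :: rest).filter (fun w => decide (w.2.2 = pvMc kv rest))).map (fun w => (w.1, w.2.1))

def pvRB (kv : List Int × List Int × Int) (rest : List (List Int × List Int × Int)) :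
    (List Int × List Int) × Int :=
  (rest.map pvMk).foldl (fun best x => if keyLt best x then x else best) (pvMk kv)

theorem find_max_frequent_pair_alt_cons (kv : List Int × List Int × Int)
    (rest : List (List Int × List Int × Int)) :
    find_max_frequent_pair_alt (kv :: rest) = pvRB kv rest := rfl

theorem find_max_frequent_pair_cons (kv : List Int × List Int × Int)
    (rest : List (List Int × List Int × Int)) :
    find_max_frequent_pair (kv :: rest) =
      (match pvCands kv rest with
       | [] => (([], []), 0)
       | c :: cs => (cs.foldl (fun acc x => if pairLt acc x then x else acc) c, pvMc kv rest)) := rfl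

-- The heart of the proof: on a nonempty list both programs return the unique item
-- that is maximal for the composite key (count, pair).
theorem find_max_frequent_pair_cons_eq (kv : List Int × List Int × Int)
    (rest : List (List Int × List Int × Int)) :
    find_max_frequent_pair (kv :: rest) = find_max_frequent_pair_alt (kv :: rest) := by
  -- B's result is maximal for the composite key
  obtain ⟨bmem, bra, ball⟩ :=
    pyfoldmax_spec keyLt keyLt_irr keyLt_trans keyLt_total (rest.map pvMk) (pvMk kv)
  have hB_mem : pvRB kv rest ∈ (kv :: rest).map pvMk := by
    rcases bmem with h | h
    · rw [List.map_cons]; exact List.mem_cons.mpr (Or.inl h)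
    · rw [List.map_cons]; exact List.mem_cons_of_mem _ h
  have hB_max : ∀ x ∈ (kv :: rest).map pvMk, keyLt (pvRB kv rest) x = false := by
    intro x hx
    rw [List.map_cons] at hx
    rcases List.mem_cons.mp hx with rfl | h
    · exact bra
    · exact ball x h
  -- A's max count and its maximality
  obtain ⟨cmem, cra, call⟩ :=
    pyfoldmax_spec intLt intLt_irr intLt_trans intLt_total (rest.map (fun kv => kv.2.2)) kv.2.2
  have hmc_mem : ∃ w ∈ kv :: rest, w.2.2 = pvMc kv rest := by
    rcases cmem with h | h
    · exact ⟨kv, List.mem_cons_self, h.symm⟩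
    · obtain ⟨w, hw, he⟩ := List.mem_map.mp h
      exact ⟨w, List.mem_cons_of_mem _ hw, he⟩
  have hmc_ub : ∀ w ∈ kv :: rest, intLt (pvMc kv rest) w.2.2 = false := by
    intro w hw
    rcases List.mem_cons.mp hw with rfl | h
    · exact cra
    · exact call _ (List.mem_map_of_mem h)
  -- candidates are nonempty
  obtain ⟨w₀, hw₀, he₀⟩ := hmc_mem
  have hcne : pvCands kv rest ≠ [] := by
    have hm : (w₀.1, w₀.2.1) ∈ pvCands kv rest :=
      List.mem_map_of_mem (List.mem_filter.mpr ⟨hw₀, by simp [he₀]⟩)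
    intro h; rw [h] at hm; exact absurd hm (List.not_mem_nil)
  obtain ⟨c, cs, hcc⟩ := List.exists_cons_of_ne_nil hcne
  -- A's result: the max of the candidates, paired with the max count
  have hAdef : find_max_frequent_pair (kv :: rest) =
      ((cs.foldl (fun acc x => if pairLt acc x then x else acc) c), pvMc kv rest) := by
    rw [find_max_frequent_pair_cons, hcc]
  obtain ⟨pmem, pra, pall⟩ := pyfoldmax_spec pairLt pairLt_irr pairLt_trans pairLt_total cs c
  have hp_mem : cs.foldl (fun acc x => if pairLt acc x then x else acc) c ∈ pvCands kv rest := by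
    rw [hcc]
    rcases pmem with h | h
    · exact List.mem_cons.mpr (Or.inl h)
    · exact List.mem_cons_of_mem _ h
  have hp_max : ∀ q ∈ pvCands kv rest,
      pairLt (cs.foldl (fun acc x => if pairLt acc x then x else acc) c) q = false := by
    intro q hq
    rw [hcc] at hq
    rcases List.mem_cons.mp hq with rfl | h
    · exact pra
    · exact pall q h
  -- A's result is maximal for the composite key
  have hA_mem : ((cs.foldl (fun acc x => if pairLt acc x then x else acc) c), pvMc kv rest)
      ∈ (kv :: rest).map pvMk := by
    obtain ⟨w, hwf, he⟩ := List.mem_map.mp hp_mem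
    obtain ⟨hwm, hwc⟩ := List.mem_filter.mp hwf
    simp only [decide_eq_true_eq] at hwc
    have : pvMk w = ((cs.foldl (fun acc x => if pairLt acc x then x else acc) c), pvMc kv rest) := by
      simp only [pvMk]; rw [he, hwc]
    exact this ▸ List.mem_map_of_mem hwm
  have hA_max : ∀ x ∈ (kv :: rest).map pvMk,
      keyLt ((cs.foldl (fun acc x => if pairLt acc x then x else acc) c), pvMc kv rest) x = false := by
    intro x hx
    obtain ⟨w, hwm, he⟩ := List.mem_map.mp hx
    subst he
    have h1 : ¬ pvMc kv rest < w.2.2 := by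
      have := hmc_ub w hwm
      simpa [intLt] using this
    simp only [keyLt, pvMk, Bool.or_eq_false_iff, Bool.and_eq_false_iff, decide_eq_false_iff_not]
    refine ⟨h1, ?_⟩
    by_cases h2 : pvMc kv rest = w.2.2
    · right
      have hm : (w.1, w.2.1) ∈ pvCands kv rest :=
        List.mem_map_of_mem (List.mem_filter.mpr ⟨hwm, by simp [h2.symm]⟩)
      exact hp_max _ hm
    · exact Or.inl h2
  rw [hAdef, find_max_frequent_pair_alt_cons]
  exact max_unique keyLt keyLt_total ((kv :: rest).map pvMk) _ _ hA_mem hB_mem hA_max hB_max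

-- ===== VERDICT (by name: the statement is the Claim_ definition above) =====
theorem find_max_frequent_pair_spec : Claim_equal_find_max_frequent_pair := by
  intro pc _ hpre
  unfold Spec_find_max_frequent_pair
  cases pc with
  | nil => exact absurd rfl hpre
  | cons kv rest => exact find_max_frequent_pair_cons_eq kv rest
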